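-- pv_equiv track=rewrite | github.com/Darwinky25/DARWIN-with-ALLA-engine | visual_semantic_translator.py | _is_rectangle
-- ===== SOURCE A (Python) =====
-- from typing import Dict, List, Tuple, Any, Optional
--
-- def _is_rectangle(positions: List[Tuple[int, int]]) -> bool:
--     """Check if positions form a rectangle"""
--     if len(positions) < 4:
--         return False
--
--     rows = [pos[0] for pos in positions]
--     cols = [pos[1] for pos in positions]
--
--     min_row, max_row = min(rows), max(rows)
--     min_col, max_col = min(cols), max(cols)
--
--     # Check if it's a filled rectangle
--     expected_positions = set()
--     for r in range(min_row, max_row + 1):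
--         for c in range(min_col, max_col + 1):
--             expected_positions.add((r, c))
--
--     return set(positions) == expected_positions
-- ===== SOURCE B (Python) =====
-- def _is_rectangle(positions):
--     """Check if positions form a rectangle"""
--     if len(positions) < 4:
--         return False
--     r0, c0 = positions[0]
--     min_r = max_r = r0
--     min_c = max_c = c0
--     for r, c in positions:
--         if r < min_r:
--             min_r = r
--         if r > max_r:
--             max_r = r
--         if c < min_c:
--             min_c = c
--         if c > max_c:
--             max_c = c
--     return len(set(positions)) == (max_r - min_r + 1) * (max_c - min_c + 1)
-- ===== Notes on version B (the rewrite author's own statement) =====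
-- stated objective: faster
-- what changed: Instead of materialising the full set of bounding-box cells and comparing sets, B makes one pass for the bounds and compares the count of distinct positions with the bounding-box area.
import Mathlib
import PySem

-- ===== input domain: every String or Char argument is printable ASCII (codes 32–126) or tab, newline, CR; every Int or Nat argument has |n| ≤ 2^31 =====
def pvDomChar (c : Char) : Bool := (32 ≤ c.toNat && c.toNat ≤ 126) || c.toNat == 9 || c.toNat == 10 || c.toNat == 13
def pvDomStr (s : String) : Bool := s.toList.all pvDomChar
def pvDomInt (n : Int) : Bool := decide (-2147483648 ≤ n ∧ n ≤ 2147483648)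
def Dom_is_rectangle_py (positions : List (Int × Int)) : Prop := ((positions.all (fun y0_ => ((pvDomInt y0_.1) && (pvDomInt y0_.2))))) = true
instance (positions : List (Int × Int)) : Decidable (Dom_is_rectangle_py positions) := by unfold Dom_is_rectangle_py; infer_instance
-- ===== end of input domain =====

-- B replaces A's materialisation of every bounding-box cell by a one-pass bounds scan
-- plus a distinct-count vs. area comparison (objective: faster).


-- ===== PORT A =====
def is_rectangle_py (positions : List (Int × Int)) : Bool :=
  if positions.length < 4 then false
  else
    let rows := positions.map (fun pos => pos.1)
    let cols := positions.map (fun pos => pos.2)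
    match PySem.List.min? rows (fun x => x), PySem.List.max? rows (fun x => x),
          PySem.List.min? cols (fun x => x), PySem.List.max? cols (fun x => x) with
    | some min_row, some max_row, some min_col, some max_col =>
        -- the nested 'for r: for c: expected.add((r, c))' loop only ever adds fresh
        -- pairwise-distinct cells, so the set it builds is exactly this nested range
        -- comprehension (same elements, same first-insertion order)
        let expected : PySem.Set (Int × Int) :=
          (PySem.List.pyRange min_row (max_row + 1) 1).flatMap
            (fun r => (PySem.List.pyRange min_col (max_col + 1) 1).map (fun c => (r, c)))
        PySem.Set.equal (PySem.Set.ofList positions) expected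
    | _, _, _, _ => false  -- unreachable: rows/cols are nonempty when length ≥ 4

-- ===== PORT B =====
def is_rectangle_py_alt (positions : List (Int × Int)) : Bool :=
  if positions.length < 4 then false
  else
    match positions with
    | [] => false  -- unreachable: length ≥ 4
    | (r0, c0) :: _ =>
      let st := positions.foldl
        (fun (s : Int × Int × Int × Int) p =>
          (if p.1 < s.1 then p.1 else s.1,
           if p.1 > s.2.1 then p.1 else s.2.1,
           if p.2 < s.2.2.1 then p.2 else s.2.2.1,
           if p.2 > s.2.2.2 then p.2 else s.2.2.2))
        (r0, r0, c0, c0)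
      decide ((PySem.Set.len (PySem.Set.ofList positions))
        = (st.2.1 - st.1 + 1) * (st.2.2.2 - st.2.2.1 + 1))

-- ===== PRECONDITION & SPEC =====
def Spec_is_rectangle_py (positions : List (Int × Int)) (out : Bool) : Prop := out = is_rectangle_py_alt positions
instance (positions : List (Int × Int)) (out : Bool) : Decidable (Spec_is_rectangle_py positions out) := by unfold Spec_is_rectangle_py; infer_instance

-- ===== CLAIM (what is proved, stated in full; the proofs are below) =====
def Claim_equal_is_rectangle_py : Prop := ∀ (positions : List (Int × Int)), Dom_is_rectangle_py positions → Spec_is_rectangle_py positions (is_rectangle_py positions)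

-- ===== LEMMAS AND PROOFS =====

-- running-min characterisation (dual of PySem.List.le_foldl_max)
theorem pv_foldl_min_le (t : List Int) (a : Int) :
    t.foldl min a ≤ a ∧ ∀ y ∈ t, t.foldl min a ≤ y := by
  induction t generalizing a with
  | nil => simp
  | cons x xs ih =>
    refine ⟨le_trans (ih (min a x)).1 (min_le_left _ _), ?_⟩
    intro y hy
    rcases List.mem_cons.mp hy with h | h
    · simpa [List.foldl_cons, h] using le_trans (ih (min a x)).1 (min_le_right a x)
    · simpa [List.foldl_cons] using (ih (min a x)).2 y h

-- B's branch updates are min / max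
theorem pv_ite_lt_eq_min (a b : Int) : (if b < a then b else a) = min a b := by
  rcases lt_or_ge b a with h | h <;> simp [h, le_of_lt]

theorem pv_ite_gt_eq_max (a b : Int) : (if b > a then b else a) = max a b := by
  rcases lt_or_ge a b with h | h <;> simp [h, le_of_lt]

-- B's four-accumulator fold, componentwise
theorem pv_fold_bounds (l : List (Int × Int)) (a b c d : Int) :
    l.foldl
      (fun (s : Int × Int × Int × Int) p =>
        (if p.1 < s.1 then p.1 else s.1,
         if p.1 > s.2.1 then p.1 else s.2.1,
         if p.2 < s.2.2.1 then p.2 else s.2.2.1,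
         if p.2 > s.2.2.2 then p.2 else s.2.2.2))
      (a, b, c, d)
    = ((l.map (fun p => p.1)).foldl min a,
       (l.map (fun p => p.1)).foldl max b,
       (l.map (fun p => p.2)).foldl min c,
       (l.map (fun p => p.2)).foldl max d) := by
  induction l generalizing a b c d with
  | nil => simp
  | cons x xs ih =>
    simp only [List.foldl_cons, List.map_cons]
    rw [ih]
    simp only [pv_ite_lt_eq_min, pv_ite_gt_eq_max]

-- membership in A's expected set of bounding-box cells
theorem pv_mem_expected (mnr mxr mnc mxc : Int) (y : Int × Int) :
    y ∈ (PySem.List.pyRange mnr (mxr + 1) 1).flatMap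
        (fun r => (PySem.List.pyRange mnc (mxc + 1) 1).map (fun c => (r, c)))
      ↔ mnr ≤ y.1 ∧ y.1 ≤ mxr ∧ mnc ≤ y.2 ∧ y.2 ≤ mxc := by
  simp only [List.mem_flatMap, List.mem_map, PySem.List.mem_pyRange_one]
  constructor
  · rintro ⟨r, hr, c, hc, rfl⟩
    exact ⟨hr.1, by omega, hc.1, by omega⟩
  · rintro ⟨h1, h2, h3, h4⟩
    exact ⟨y.1, ⟨h1, by omega⟩, y.2, ⟨h3, by omega⟩, rfl⟩

-- the core count-vs-set-equality bridge
theorem pv_core (positions : List (Int × Int)) (mnr mxr mnc mxc : Int)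
    (hsub : ∀ p ∈ positions, mnr ≤ p.1 ∧ p.1 ≤ mxr ∧ mnc ≤ p.2 ∧ p.2 ≤ mxc)
    (hr : mnr ≤ mxr) (hc : mnc ≤ mxc) :
    (∀ x : Int × Int, x ∈ PySem.Set.ofList positions ↔ mnr ≤ x.1 ∧ x.1 ≤ mxr ∧ mnc ≤ x.2 ∧ x.2 ≤ mxc)
      ↔ ((PySem.Set.ofList positions).length : Int) = (mxr - mnr + 1) * (mxc - mnc + 1) := by
  set S : List (Int × Int) := PySem.Set.ofList positions with hS
  have hnd : S.Nodup := PySem.Set.nodup_ofList positions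
  have hmemS : ∀ x : Int × Int, x ∈ S ↔ x ∈ positions := fun x => by
    rw [hS]; exact PySem.Set.mem_ofList _ _
  set Box : Finset (Int × Int) := Finset.Icc mnr mxr ×ˢ Finset.Icc mnc mxc with hBox
  have hmemBox : ∀ x : Int × Int, x ∈ Box ↔ mnr ≤ x.1 ∧ x.1 ≤ mxr ∧ mnc ≤ x.2 ∧ x.2 ≤ mxc := by
    intro x
    simp [hBox, Finset.mem_product, and_assoc]
  have hsubF : S.toFinset ⊆ Box := by
    intro x hx
    exact (hmemBox x).mpr (hsub x ((hmemS x).mp (List.mem_toFinset.mp hx)))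
  have hcardS : S.toFinset.card = S.length := List.toFinset_card_of_nodup hnd
  have hcardBox : (Box.card : Int) = (mxr - mnr + 1) * (mxc - mnc + 1) := by
    have : Box.card = (mxr + 1 - mnr).toNat * (mxc + 1 - mnc).toNat := by
      simp [hBox, Finset.card_product, Int.card_Icc]
    rw [this]
    push_cast [Int.toNat_of_nonneg (by omega : (0:Int) ≤ mxr + 1 - mnr),
      Int.toNat_of_nonneg (by omega : (0:Int) ≤ mxc + 1 - mnc)]
    ring
  constructor
  · intro h
    have hEq : S.toFinset = Box := by
      apply Finset.ext
      intro x
      rw [List.mem_toFinset, h x, hmemBox x]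
    rw [← hcardBox, ← hEq, hcardS]
  · intro h
    have hle : Box.card ≤ S.toFinset.card := by
      have : (S.length : Int) = (Box.card : Int) := by rw [h, hcardBox]
      omega
    have hEq : S.toFinset = Box := Finset.eq_of_subset_of_card_le hsubF hle
    intro x
    rw [← hmemBox x, ← hEq, List.mem_toFinset]

-- ===== VERDICT (by name: the statement is the Claim_ definition above) =====
theorem is_rectangle_py_spec : Claim_equal_is_rectangle_py := by
  intro positions _
  unfold Spec_is_rectangle_py is_rectangle_py is_rectangle_py_alt
  by_cases hlen : positions.length < 4
  · simp [hlen]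
  · simp only [hlen, if_false]
    match positions, hlen with
    | [], hlen => simp at hlen
    | (r0, c0) :: rest, hlen =>
      simp only []
      rw [List.map_cons, List.map_cons, PySem.List.min?_id_cons, PySem.List.max?_id_cons,
        PySem.List.min?_id_cons, PySem.List.max?_id_cons]
      rw [pv_fold_bounds]
      simp only [List.map_cons, List.foldl_cons, min_self, max_self]
      set rs := rest.map (fun p : Int × Int => p.1) with hrs
      set cs := rest.map (fun p : Int × Int => p.2) with hcs
      set mnr := rs.foldl min r0 with hmnr
      set mxr := rs.foldl max r0 with hmxr
      set mnc := cs.foldl min c0 with hmnc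
      set mxc := cs.foldl max c0 with hmxc
      have hrb : mnr ≤ r0 ∧ r0 ≤ mxr :=
        ⟨(pv_foldl_min_le rs r0).1, (PySem.List.le_foldl_max rs r0).1⟩
      have hcb : mnc ≤ c0 ∧ c0 ≤ mxc :=
        ⟨(pv_foldl_min_le cs c0).1, (PySem.List.le_foldl_max cs c0).1⟩
      have hsub : ∀ p ∈ (r0, c0) :: rest, mnr ≤ p.1 ∧ p.1 ≤ mxr ∧ mnc ≤ p.2 ∧ p.2 ≤ mxc := by
        rintro p hp
        rcases List.mem_cons.mp hp with rfl | hp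
        · exact ⟨hrb.1, hrb.2, hcb.1, hcb.2⟩
        · have h1 : p.1 ∈ rs := List.mem_map.mpr ⟨p, hp, rfl⟩
          have h2 : p.2 ∈ cs := List.mem_map.mpr ⟨p, hp, rfl⟩
          exact ⟨(pv_foldl_min_le rs r0).2 _ h1, (PySem.List.le_foldl_max rs r0).2 _ h1,
            (pv_foldl_min_le cs c0).2 _ h2, (PySem.List.le_foldl_max cs c0).2 _ h2⟩
      rw [Bool.eq_iff_iff, PySem.Set.equal_iff, decide_eq_true_iff]
      have hmem : ∀ x : Int × Int,
          (x ∈ (PySem.List.pyRange mnr (mxr + 1) 1).flatMap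
            (fun r => (PySem.List.pyRange mnc (mxc + 1) 1).map (fun c => (r, c))))
          ↔ mnr ≤ x.1 ∧ x.1 ≤ mxr ∧ mnc ≤ x.2 ∧ x.2 ≤ mxc :=
        fun x => pv_mem_expected mnr mxr mnc mxc x
      have hcore := pv_core ((r0, c0) :: rest) mnr mxr mnc mxc hsub
        (le_trans hrb.1 hrb.2) (le_trans hcb.1 hcb.2)
      constructor
      · intro h
        simp only [PySem.Set.len]
        exact hcore.mp (fun x => (h x).trans (hmem x))
      · intro h x
        rw [hmem x]
        exact (hcore.mpr (by simp only [PySem.Set.len] at h; exact_mod_cast h)) x
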